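-- pv_equiv track=rewrite | github.com/SourceBox-LLC/FineFoundry | src/helpers/datasets.py | guess_input_output_columns
-- ===== SOURCE A (Python) =====
-- from typing import List, Optional, Tuple
--
-- def guess_input_output_columns(names: List[str]) -> Tuple[Optional[str], Optional[str]]:
--     """Guess likely input/output column names from a list of dataset column names.
--
--     Preference order covers common patterns found in instruction-tuning and Q/A datasets.
--     Returns a tuple (input_col, output_col), any of which may be None if not found.
--     """
--     low = {n.lower(): n for n in (names or [])}
--     in_cands = [
--         "input",
--         "prompt",
--         "question",
--         "instruction",
--         "source",
--         "text",
--         "query",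
--         "context",
--         "post",
--     ]
--     out_cands = [
--         "output",
--         "response",
--         "answer",
--         "completion",
--         "target",
--         "label",
--         "reply",
--     ]
--     inn = next((low[x] for x in in_cands if x in low), None)
--     outn = next((low[x] for x in out_cands if x in low), None)
--     if inn is None and outn is None:
--         if "question" in low and "answer" in low:
--             return low["question"], low["answer"]
--     return inn, outn
-- ===== SOURCE B (Python) =====
-- from typing import List, Optional, Tuple
--
-- _IN_CANDS = [
--     "input", "prompt", "question", "instruction", "source",
--     "text", "query", "context", "post",
-- ]
-- _OUT_CANDS = [
--     "output", "response", "answer", "completion", "target", "label", "reply",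
-- ]
-- _IN_RANK = {c: i for i, c in enumerate(_IN_CANDS)}
-- _OUT_RANK = {c: i for i, c in enumerate(_OUT_CANDS)}
--
--
-- def guess_input_output_columns(names: List[str]) -> Tuple[Optional[str], Optional[str]]:
--     """Single pass over names, keeping the best-ranked match for each side.
--
--     Later names with an equal rank overwrite earlier ones (same behaviour as a
--     dict comprehension where the last occurrence of a lowercase key wins).
--     """
--     best_in = None   # (rank, name)
--     best_out = None
--     for n in names:
--         l = n.lower()
--         r = _IN_RANK.get(l)
--         if r is not None and (best_in is None or r <= best_in[0]):
--             best_in = (r, n)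
--         r = _OUT_RANK.get(l)
--         if r is not None and (best_out is None or r <= best_out[0]):
--             best_out = (r, n)
--     return (best_in[1] if best_in else None,
--             best_out[1] if best_out else None)
-- ===== Notes on version B (the rewrite author's own statement) =====
-- stated objective: alternative
-- what changed: Instead of building a lowercase->name dict and scanning each candidate list for its first present key, B precomputes rank tables for the candidates and makes a single pass over the names, keeping the best-ranked (last on ties) match per side; the dead question/answer fallback branch is dropped.
import Mathlib
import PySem

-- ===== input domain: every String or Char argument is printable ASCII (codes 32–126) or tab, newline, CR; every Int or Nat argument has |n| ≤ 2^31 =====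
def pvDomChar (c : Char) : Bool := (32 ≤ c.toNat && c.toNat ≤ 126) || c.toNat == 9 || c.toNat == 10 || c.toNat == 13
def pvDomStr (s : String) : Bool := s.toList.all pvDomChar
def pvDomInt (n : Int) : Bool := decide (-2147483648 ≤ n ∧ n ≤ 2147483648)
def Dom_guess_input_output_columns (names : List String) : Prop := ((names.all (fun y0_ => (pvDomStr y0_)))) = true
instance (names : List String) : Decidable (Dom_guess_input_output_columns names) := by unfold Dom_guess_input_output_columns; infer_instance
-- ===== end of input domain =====

-- B replaces A's lowercase->name dict plus per-candidate-list scans by a single pass over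
-- the names keeping the best-ranked match per side (objective: alternative decomposition).

-- ===== PORT A =====
def pvInCands : List String :=
  ["input", "prompt", "question", "instruction", "source", "text", "query", "context", "post"]

def pvOutCands : List String :=
  ["output", "response", "answer", "completion", "target", "label", "reply"]

-- low = {n.lower(): n for n in (names or [])}  ('names or []' = names, for a list argument)
def pvLow (names : List String) : PySem.Dict String String :=
  names.foldl (fun d n => d.insert (PySem.Str.lower n) n) PySem.Dict.empty

-- next((low[x] for x in cands if x in low), None)
def pvPick (low : PySem.Dict String String) : List String → Option String
  | [] => none
  | x :: rest => if low.contains x then low.get? x else pvPick low rest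

def guess_input_output_columns (names : List String) : Option String × Option String :=
  let low := pvLow names
  let inn := pvPick low pvInCands
  let outn := pvPick low pvOutCands
  if inn = none ∧ outn = none then
    if low.contains "question" && low.contains "answer" then
      (low.get? "question", low.get? "answer")
    else (inn, outn)
  else (inn, outn)

-- ===== PORT B =====
-- _IN_RANK = {c: i for i, c in enumerate(_IN_CANDS)}   (and likewise for the output side)
def pvInRank : PySem.Dict String Int :=
  (PySem.List.enumerate pvInCands 0).foldl (fun d p => d.insert p.2 p.1) PySem.Dict.empty

def pvOutRank : PySem.Dict String Int :=
  (PySem.List.enumerate pvOutCands 0).foldl (fun d p => d.insert p.2 p.1) PySem.Dict.empty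

-- r = rank.get(l); if r is not None and (best is None or r <= best[0]): best = (r, n)
def pvStep (rank : PySem.Dict String Int) (best : Option (Int × String)) (l n : String) :
    Option (Int × String) :=
  match rank.get? l with
  | none => best
  | some r =>
    match best with
    | none => some (r, n)
    | some (j, _) => if r ≤ j then some (r, n) else best

def guess_input_output_columns_alt (names : List String) : Option String × Option String :=
  let s := names.foldl
    (fun st n =>
      let l := PySem.Str.lower n
      (pvStep pvInRank st.1 l n, pvStep pvOutRank st.2 l n))
    ((none, none) : Option (Int × String) × Option (Int × String))
  (s.1.map Prod.snd, s.2.map Prod.snd)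

-- ===== PRECONDITION & SPEC =====
def Spec_guess_input_output_columns (names : List String) (out : Option String × Option String) : Prop := out = guess_input_output_columns_alt names
instance (names : List String) (out : Option String × Option String) : Decidable (Spec_guess_input_output_columns names out) := by unfold Spec_guess_input_output_columns; infer_instance

-- ===== CLAIM (what is proved, stated in full; the proofs are below) =====
def Claim_equal_guess_input_output_columns : Prop := ∀ (names : List String), Dom_guess_input_output_columns names → Spec_guess_input_output_columns names (guess_input_output_columns names)

-- ===== LEMMAS AND PROOFS =====

-- first contained candidate from index i, paired with its rank and dict value
def pvSel (d : PySem.Dict String String) : List String → Int → Option (Int × String)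
  | [], _ => none
  | x :: rest, i => if d.contains x then some (i, d.getD x "") else pvSel d rest (i + 1)

-- first index of l in the candidate list, counted from i
def pvIdx : List String → String → Int → Option Int
  | [], _, _ => none
  | x :: rest, l, i => if x = l then some i else pvIdx rest l (i + 1)

theorem pvSel_ge (d : PySem.Dict String String) (c : List String) :
    ∀ (i j : Int) (v : String), pvSel d c i = some (j, v) → i ≤ j := by
  induction c with
  | nil => intro i j v h; simp [pvSel] at h
  | cons x rest ih =>
    intro i j v h
    simp only [pvSel] at h
    split at h
    · simp at h; omega
    · have := ih (i + 1) j v h; omega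

theorem pvIdx_ge (c : List String) :
    ∀ (l : String) (i j : Int), pvIdx c l i = some j → i ≤ j := by
  induction c with
  | nil => intro l i j h; simp [pvIdx] at h
  | cons x rest ih =>
    intro l i j h
    simp only [pvIdx] at h
    split at h
    · simp at h; omega
    · have := ih l (i + 1) j h; omega

theorem pvPick_eq (d : PySem.Dict String String) (c : List String) :
    ∀ i : Int, pvPick d c = (pvSel d c i).map Prod.snd := by
  induction c with
  | nil => intro i; simp [pvPick, pvSel]
  | cons x rest ih =>
    intro i
    simp only [pvPick, pvSel]
    by_cases h : d.contains x
    · simp [h, PySem.Dict.getD_eq_get?_getD]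
      have : (d.get? x).isSome := by rw [← PySem.Dict.contains_eq_isSome_get?]; exact h
      cases hg : d.get? x with
      | none => simp [hg] at this
      | some v => simp
    · simp [h, ih (i + 1)]

def pvComb (idx : Option Int) (sel : Option (Int × String)) (n : String) :
    Option (Int × String) :=
  match idx with
  | none => sel
  | some r =>
    match sel with
    | none => some (r, n)
    | some (j, v) => if r ≤ j then some (r, n) else some (j, v)

theorem pvSel_insert (d : PySem.Dict String String) (c : List String) (l n : String) :
    ∀ i : Int, pvSel (d.insert l n) c i = pvComb (pvIdx c l i) (pvSel d c i) n := by
  induction c with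
  | nil => intro i; simp [pvSel, pvIdx, pvComb]
  | cons x rest ih =>
    intro i
    by_cases hx : x = l
    · subst hx
      have hL : pvSel (d.insert x n) (x :: rest) i = some (i, n) := by
        simp [pvSel, PySem.Dict.contains_insert_self, PySem.Dict.getD_insert_self]
      rw [hL, show pvIdx (x :: rest) x i = some i by simp [pvIdx]]
      cases hs : pvSel d (x :: rest) i with
      | none => simp [pvComb]
      | some jv =>
        obtain ⟨j, v⟩ := jv
        have hij := pvSel_ge d (x :: rest) i j v hs
        simp [pvComb, if_pos hij]
    · have hcontains : (d.insert l n).contains x = d.contains x := by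
        rw [PySem.Dict.contains_insert]
        simp [show (x == l) = false by simpa using hx]
      have hgetD : (d.insert l n).getD x "" = d.getD x "" :=
        PySem.Dict.getD_insert_of_ne d n "" hx
      rw [show pvIdx (x :: rest) l i = pvIdx rest l (i + 1) by simp [pvIdx, hx]]
      by_cases hc : d.contains x
      · have hL : pvSel (d.insert l n) (x :: rest) i = some (i, d.getD x "") := by
          simp [pvSel, hcontains, hgetD, hc]
        have hR : pvSel d (x :: rest) i = some (i, d.getD x "") := by
          simp [pvSel, hc]
        rw [hL, hR]
        cases hridx : pvIdx rest l (i + 1) with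
        | none => simp [pvComb]
        | some r =>
          have hr := pvIdx_ge rest l (i + 1) r hridx
          simp [pvComb, if_neg (by omega : ¬ r ≤ i)]
      · have hL : pvSel (d.insert l n) (x :: rest) i = pvSel (d.insert l n) rest (i + 1) := by
          simp [pvSel, hcontains, hc]
        have hR : pvSel d (x :: rest) i = pvSel d rest (i + 1) := by
          simp [pvSel, hc]
        rw [hL, hR]
        exact ih (i + 1)

theorem pvSel_none_contains (d : PySem.Dict String String) (c : List String) :
    ∀ i : Int, pvSel d c i = none → ∀ x ∈ c, d.contains x = false := by
  induction c with
  | nil => intro i _ x hx; simp at hx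
  | cons y rest ih =>
    intro i h x hx
    simp only [pvSel] at h
    split at h
    · simp at h
    · rcases List.mem_cons.mp hx with rfl | hx'
      · simpa using ‹¬ d.contains x = true›
      · exact ih (i + 1) h x hx'

theorem pvRank_in_eq (l : String) : pvInRank.get? l = pvIdx pvInCands l 0 := by
  show (PySem.Dict.mk [("input", (0:Int)), ("prompt", 1), ("question", 2), ("instruction", 3),
    ("source", 4), ("text", 5), ("query", 6), ("context", 7), ("post", 8)]).get? l
      = pvIdx pvInCands l 0
  simp only [PySem.Dict.get?_mk_cons, pvIdx, pvInCands, beq_iff_eq]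
  norm_num [show (PySem.Dict.mk ([] : List (String × Int))).get? l = none from rfl, eq_comm]

theorem pvRank_out_eq (l : String) : pvOutRank.get? l = pvIdx pvOutCands l 0 := by
  show (PySem.Dict.mk [("output", (0:Int)), ("response", 1), ("answer", 2), ("completion", 3),
    ("target", 4), ("label", 5), ("reply", 6)]).get? l = pvIdx pvOutCands l 0
  simp only [PySem.Dict.get?_mk_cons, pvIdx, pvOutCands, beq_iff_eq]
  norm_num [show (PySem.Dict.mk ([] : List (String × Int))).get? l = none from rfl, eq_comm]

theorem pvStep_sel (rank : PySem.Dict String Int) (cands : List String)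
    (hrank : ∀ l, rank.get? l = pvIdx cands l 0)
    (d : PySem.Dict String String) (l n : String) :
    pvStep rank (pvSel d cands 0) l n = pvSel (d.insert l n) cands 0 := by
  rw [pvSel_insert d cands l n 0]
  simp only [pvStep, hrank l]
  cases pvIdx cands l 0 with
  | none => rfl
  | some r =>
    cases pvSel d cands 0 with
    | none => rfl
    | some jv => rfl

theorem pvFold_inv (names : List String) :
    ∀ d : PySem.Dict String String,
      names.foldl
        (fun st n =>
          let l := PySem.Str.lower n
          (pvStep pvInRank st.1 l n, pvStep pvOutRank st.2 l n))
        (pvSel d pvInCands 0, pvSel d pvOutCands 0)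
      = (pvSel (names.foldl (fun d n => d.insert (PySem.Str.lower n) n) d) pvInCands 0,
         pvSel (names.foldl (fun d n => d.insert (PySem.Str.lower n) n) d) pvOutCands 0) := by
  induction names with
  | nil => intro d; rfl
  | cons n rest ih =>
    intro d
    simp only [List.foldl_cons]
    rw [show (pvStep pvInRank (pvSel d pvInCands 0) (PySem.Str.lower n) n,
          pvStep pvOutRank (pvSel d pvOutCands 0) (PySem.Str.lower n) n)
        = (pvSel (d.insert (PySem.Str.lower n) n) pvInCands 0,
           pvSel (d.insert (PySem.Str.lower n) n) pvOutCands 0) from by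
      rw [pvStep_sel pvInRank pvInCands pvRank_in_eq,
          pvStep_sel pvOutRank pvOutCands pvRank_out_eq]]
    exact ih (d.insert (PySem.Str.lower n) n)

theorem pvSel_empty (c : List String) : ∀ i : Int, pvSel PySem.Dict.empty c i = none := by
  induction c with
  | nil => intro i; rfl
  | cons x rest ih => intro i; simp [pvSel, PySem.Dict.contains_empty, ih]

-- ===== VERDICT (by name: the statement is the Claim_ definition above) =====
theorem guess_input_output_columns_spec : Claim_equal_guess_input_output_columns := by
  intro names _
  unfold Spec_guess_input_output_columns guess_input_output_columns guess_input_output_columns_alt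
  have hfold := pvFold_inv names PySem.Dict.empty
  rw [pvSel_empty pvInCands 0, pvSel_empty pvOutCands 0] at hfold
  have hfold' : List.foldl
      (fun st n =>
        let l := PySem.Str.lower n
        (pvStep pvInRank st.1 l n, pvStep pvOutRank st.2 l n))
      ((none, none) : Option (Int × String) × Option (Int × String)) names
    = (pvSel (pvLow names) pvInCands 0, pvSel (pvLow names) pvOutCands 0) := hfold
  simp only [hfold']
  rw [pvPick_eq (pvLow names) pvInCands 0, pvPick_eq (pvLow names) pvOutCands 0]
  by_cases hin : pvSel (pvLow names) pvInCands 0 = none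
  · have hq : (pvLow names).contains "question" = false :=
      pvSel_none_contains (pvLow names) pvInCands 0 hin "question" (by simp [pvInCands])
    simp [hin, hq]
  · simp [hin]
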